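-- pv_equiv track=rewrite | github.com/nyh10063/Automatic-Annotation-of-Korean-Grammatical-Items | kmwe/stages/train_llm_sft.py | _resolve_eval_gold_e_ids
-- ===== SOURCE A (Python) =====
-- from typing import Any
--
-- def _resolve_eval_gold_e_ids(metadata: dict[str, Any]) -> list[str]:
--     effective = [str(x).strip() for x in (metadata.get("effective_gold_e_ids") or []) if str(x).strip()]
--     if effective:
--         return effective
--     forced = [str(x).strip() for x in (metadata.get("gold_e_ids_single_if_forced") or []) if str(x).strip()]
--     if forced:
--         return forced
--     return [str(x).strip() for x in (metadata.get("gold_e_ids") or []) if str(x).strip()]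
-- ===== SOURCE B (Python) =====
-- from typing import Any
--
-- def _resolve_eval_gold_e_ids(metadata: dict[str, Any]) -> list[str]:
--     # Fold over the keys from LOWEST to HIGHEST priority with an override
--     # accumulator: each non-empty cleaned list replaces the result so far,
--     # so the highest-priority non-empty list wins.  No early returns.
--     result: list[str] = []
--     for key in ("gold_e_ids", "gold_e_ids_single_if_forced", "effective_gold_e_ids"):
--         cleaned = list(filter(None, (str(x).strip() for x in (metadata.get(key) or ()))))
--         if cleaned:
--             result = cleaned
--     return result
-- ===== Notes on version B (the rewrite author's own statement) =====
-- stated objective: alternative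
-- what changed: Replaces A's forward early-return cascade with a reverse-priority override fold (lowest-priority key first, each non-empty cleaned list overwrites the accumulator, no early return), and cleans via staged map-then-filter instead of a guarded comprehension.
import Mathlib
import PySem

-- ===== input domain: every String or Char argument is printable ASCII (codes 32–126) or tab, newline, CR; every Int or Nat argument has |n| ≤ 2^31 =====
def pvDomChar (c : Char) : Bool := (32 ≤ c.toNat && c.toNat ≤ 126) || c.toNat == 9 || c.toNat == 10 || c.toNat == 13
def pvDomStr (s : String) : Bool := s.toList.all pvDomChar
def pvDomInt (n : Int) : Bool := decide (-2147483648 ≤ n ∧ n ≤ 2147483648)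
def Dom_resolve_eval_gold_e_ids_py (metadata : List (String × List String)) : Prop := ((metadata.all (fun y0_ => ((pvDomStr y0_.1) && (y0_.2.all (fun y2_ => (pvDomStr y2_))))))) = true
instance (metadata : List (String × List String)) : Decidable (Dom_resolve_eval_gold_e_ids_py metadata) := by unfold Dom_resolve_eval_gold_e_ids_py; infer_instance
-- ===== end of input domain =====

-- ===== PORT A =====
-- A's comprehension '[str(x).strip() for x in (metadata.get(k) or []) if str(x).strip()]',
-- transliterated per branch (values are already str, so str(x) = x; 'or []' sends None and [] both to []).
-- B differs from A only in structure (reverse-priority override fold); return value only, no mutation.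
def resolve_eval_gold_e_ids_py (metadata : List (String × List String)) : List String :=
  let effective := ((metadata.lookup "effective_gold_e_ids").getD []).filterMap
    (fun x => let s := PySem.Str.strip x; if s ≠ "" then some s else none)
  if effective ≠ [] then effective
  else
    let forced := ((metadata.lookup "gold_e_ids_single_if_forced").getD []).filterMap
      (fun x => let s := PySem.Str.strip x; if s ≠ "" then some s else none)
    if forced ≠ [] then forced
    else ((metadata.lookup "gold_e_ids").getD []).filterMap
      (fun x => let s := PySem.Str.strip x; if s ≠ "" then some s else none)

-- ===== PORT B =====
-- B's 'list(filter(None, (str(x).strip() for x in (metadata.get(key) or ()))))':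
-- strip every element, then filter out the empty strings (staged map-then-filter).
def pvCleanB (o : Option (List String)) : List String :=
  ((o.getD []).map PySem.Str.strip).filter (fun s => s ≠ "")

-- B's for-loop: fold over the keys from lowest to highest priority, overriding the accumulator.
def resolve_eval_gold_e_ids_py_alt (metadata : List (String × List String)) : List String :=
  ["gold_e_ids", "gold_e_ids_single_if_forced", "effective_gold_e_ids"].foldl
    (fun result key =>
      let cleaned := pvCleanB (metadata.lookup key)
      if cleaned ≠ [] then cleaned else result) []

-- ===== PRECONDITION & SPEC =====
def Spec_resolve_eval_gold_e_ids_py (metadata : List (String × List String)) (out : List String) : Prop := out = resolve_eval_gold_e_ids_py_alt metadata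
instance (metadata : List (String × List String)) (out : List String) : Decidable (Spec_resolve_eval_gold_e_ids_py metadata out) := by unfold Spec_resolve_eval_gold_e_ids_py; infer_instance

-- ===== CLAIM (what is proved, stated in full; the proofs are below) =====
def Claim_equal_resolve_eval_gold_e_ids_py : Prop := ∀ (metadata : List (String × List String)), Dom_resolve_eval_gold_e_ids_py metadata → Spec_resolve_eval_gold_e_ids_py metadata (resolve_eval_gold_e_ids_py metadata)

-- ===== LEMMAS AND PROOFS =====
-- B's staged map-then-filter cleaning equals A's guarded comprehension (filterMap form).
theorem pvCleanB_eq (o : Option (List String)) :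
    pvCleanB o = (o.getD []).filterMap
      (fun x => let s := PySem.Str.strip x; if s ≠ "" then some s else none) := by
  unfold pvCleanB
  induction (o.getD []) with
  | nil => rfl
  | cons x xs ih =>
    rw [List.map_cons, List.filter_cons, List.filterMap_cons, ih]
    by_cases h : PySem.Str.strip x = "" <;> simp [h]

-- ===== VERDICT (by name: the statement is the Claim_ definition above) =====
theorem resolve_eval_gold_e_ids_py_spec : Claim_equal_resolve_eval_gold_e_ids_py := by
  intro metadata _
  unfold Spec_resolve_eval_gold_e_ids_py resolve_eval_gold_e_ids_py resolve_eval_gold_e_ids_py_alt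
  simp only [List.foldl_cons, List.foldl_nil, pvCleanB_eq]
  split_ifs <;> simp_all
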